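/-
  THE CONTRACTS OF THE DECODER'S CONTEXT-FREE LEAVES, second file (c/stb_vorbis_fixed.c; design/CONTRACTS.md entries 109, 52,
  25, 78, 79, 89): `square`, `bit_reverse`, `ilog`, `uint32_compare`, `point_compare`, `include_in_sort`. `Spec`s over the shadow
  layer only — no decoder invariant. Ghost parameters of every Spec: `others`, `frames` (the live objects of the shadow
  invariant), also for the two functions that touch no memory (uniform statements).

      shadowUntouched_of_mem_eq       `square`, `bit_reverse` say `v.mem = u.mem`: the shadow clause from it
      log2_4Table, Log2_4In mem       the sixteen bytes of the global `log2_4`, and "they are in `mem`" (SH7 for this table)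
      ilogVal n                       the value `ilog(n)` computes with that table: the C text's seven-way split
      bitLen n, ilogVal_eq_bitLen     … which is the bit length of `n` (0 for `n ≤ 0`); the bounds callers use:
                                      `ilogVal_le_of_lt` (n < 2^k → ilog n ≤ k), `ilogVal_two_pow` (ilog(2^k) = k + 1)
      part32_toInt                    the signed 32-bit argument `(Word.part .w32 r).toInt` as `sint32 (r.toNat % 2 ^ 32)`
      cmpResult x y                   the value (in rax) a three-way unsigned comparison of this image returns: FFFFFFFFH, 0, 1
      includeInSort sparse len        the value of `include_in_sort`
-/
import Vorbis.Spec.Basic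
import Vorbis.Fields.Offsets
import Vorbis.Globals
namespace Vorbis.Spec
open X86 X86.User Asan

/-! ### `square`, `bit_reverse`: no memory access, no stack -/

/-- **`square(xmm0 = x)`** (CONTRACTS 109): `mulss xmm0, xmm0 ; ret`. The float is opaque: nothing is said about xmm0.
No memory access and no stack use: the memory of the returned state IS the memory of the entry state (from which
`ShadowUntouched u.mem v.mem` is `Mem.EqOn.refl`). -/
def square.spec (others : List Obj) (frames : List (Nat × FrameLayout)) : Spec where
  pre u :=
    ShadowPre others frames u
  post u v :=
    v.mem = u.mem
  frame := 0
  writes _ := []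

@[vspec] theorem square.spec_frame (others : List Obj) (frames : List (Nat × FrameLayout)) :
    (square.spec others frames).frame = 0 := id rfl

@[vspec] theorem square.spec_writes (others : List Obj) (frames : List (Nat × FrameLayout)) (u : State) :
    (square.spec others frames).writes u = [] := id rfl

/-- **`bit_reverse(edi = n)`** (CONTRACTS 52): 26 straight-line integer instructions on eax, edx, edi. No caller needs the
value (compute_bitreverse shifts it right by 35 − k inside eax, compute_codewords / compute_sorted_huffman /
compute_accelerated_huffman store it or compare it with an explicit bound, codebook_decode_scalar_raw searches with it: every
index is in range whatever it is), so the contract says only that the function returns and that the memory of the returned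
state IS the memory of the entry state. -/
def bit_reverse.spec (others : List Obj) (frames : List (Nat × FrameLayout)) : Spec where
  pre u :=
    ShadowPre others frames u
  post u v :=
    v.mem = u.mem
  frame := 0
  writes _ := []

@[vspec] theorem bit_reverse.spec_frame (others : List Obj) (frames : List (Nat × FrameLayout)) :
    (bit_reverse.spec others frames).frame = 0 := id rfl

@[vspec] theorem bit_reverse.spec_writes (others : List Obj) (frames : List (Nat × FrameLayout)) (u : State) :
    (bit_reverse.spec others frames).writes u = [] := id rfl

/-- The shadow clause of a post that says `v.mem = u.mem` (`square`, `bit_reverse`): what a caller's `ShadowPre.post` asks. -/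
theorem shadowUntouched_of_mem_eq {m m' : Mem} (h : m' = m) : ShadowUntouched m m' := by
  subst h
  exact Mem.EqOn.refl _ _ _

/-! ### `ilog`: the table `log2_4` -/

/-- The sixteen bytes of the global `log2_4` (stb_vorbis_fixed.c 1055): `log2_4[k]` is the bit length of `k`. -/
def log2_4Table : List Nat := [0, 1, 2, 2, 3, 3, 3, 3, 4, 4, 4, 4, 4, 4, 4, 4]

/-- **The global `log2_4` has its contents in `mem`** (SH7, "the image's constants are unchanged", for this table): byte `i`
of the object `Vorbis.Globals.log2_4` is `log2_4Table[i]`. Needed for the VALUE of `ilog`, not for its safety. -/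
def Log2_4In (mem : Mem) : Prop :=
  ∀ i, i < 16 → mem.readLE (UInt64.ofNat (Vorbis.Globals.log2_4.beg + i)) 1 = log2_4Table.getD i 0

/-- Every entry of the table is at most 4 (so `movsx eax, BYTE PTR […]` reads it unchanged, and `add eax, c` does not wrap). -/
theorem log2_4Table_le (i : Nat) : log2_4Table.getD i 0 ≤ 4 := by
  by_cases h : i < 16
  · have hall : ∀ j, j < 16 → log2_4Table.getD j 0 ≤ 4 := by decide
    exact hall i h
  · have hlen : log2_4Table.length ≤ i := by
      have e : log2_4Table.length = 16 := rfl
      omega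
    rw [List.getD_eq_getElem?_getD, List.getElem?_eq_none hlen]
    exact Nat.zero_le 4

/-- **The value `ilog(n)` computes** when the table has its contents (stb_vorbis_fixed.c 1053-1070, the seven ranges of
CONTRACTS 25): 0 for a negative `n`, else `c + log2_4[n >> c]` with `c` = 0, 5, 10, 15, 20, 25, 30 chosen by the size of `n`. -/
def ilogVal (n : Int) : Nat :=
  if n < 0 then 0
  else if n < 2 ^ 4 then log2_4Table.getD n.toNat 0
  else if n < 2 ^ 9 then 5 + log2_4Table.getD (n.toNat / 2 ^ 5) 0
  else if n < 2 ^ 14 then 10 + log2_4Table.getD (n.toNat / 2 ^ 10) 0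
  else if n < 2 ^ 19 then 15 + log2_4Table.getD (n.toNat / 2 ^ 15) 0
  else if n < 2 ^ 24 then 20 + log2_4Table.getD (n.toNat / 2 ^ 20) 0
  else if n < 2 ^ 29 then 25 + log2_4Table.getD (n.toNat / 2 ^ 25) 0
  else 30 + log2_4Table.getD (n.toNat / 2 ^ 30) 0

/-! #### The value is the bit length -/

/-- The bit length of a number: 0 for 0, else `⌊log₂ n⌋ + 1`. -/
def bitLen (n : Nat) : Nat :=
  if n = 0 then 0 else Nat.log2 n + 1

/-- The bit length from the two powers of two around the number. -/
theorem bitLen_eq_of_bounds {n t : Nat} (h1 : 2 ^ t ≤ n) (h2 : n < 2 ^ (t + 1)) : bitLen n = t + 1 := by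
  have hpos : 0 < 2 ^ t := Nat.pow_pos (by decide)
  have hn : n ≠ 0 := by omega
  unfold bitLen
  rw [if_neg hn]
  have a : t ≤ n.log2 := (Nat.le_log2 hn).mpr h1
  have b : n.log2 < t + 1 := (Nat.log2_lt hn).mpr h2
  omega

/-- A number below `2 ^ k` has at most `k` bits. -/
theorem bitLen_le_of_lt {n k : Nat} (h : n < 2 ^ k) : bitLen n ≤ k := by
  unfold bitLen
  split
  · exact Nat.zero_le k
  · next hn =>
    have := (Nat.log2_lt hn).mpr h
    omega

/-- `2 ^ k` has `k + 1` bits. -/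
theorem bitLen_two_pow (k : Nat) : bitLen (2 ^ k) = k + 1 :=
  bitLen_eq_of_bounds (Nat.le_refl _) (Nat.pow_lt_pow_right (by decide) (Nat.lt_succ_self k))

/-- The table `log2_4`, entry by entry, as the two powers of two around the index. -/
theorem log2_4Table_bounds : ∀ k, k < 16 → 0 < k →
    1 ≤ log2_4Table.getD k 0 ∧ 2 ^ (log2_4Table.getD k 0 - 1) ≤ k ∧ k < 2 ^ (log2_4Table.getD k 0) := by
  decide

/-- **One range of `ilog`**: if `n >> s` is in `[1, 15]`, the bit length of `n` is `s + log2_4[n >> s]`. -/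
theorem bitLen_shift (n s k : Nat) (hk : n / 2 ^ s = k) (h0 : 0 < k) (h16 : k < 16) :
    bitLen n = s + log2_4Table.getD k 0 := by
  obtain ⟨t1, tlo, thi⟩ := log2_4Table_bounds k h16 h0
  generalize log2_4Table.getD k 0 = t at t1 tlo thi
  have hs : 0 < 2 ^ s := Nat.pow_pos (by decide)
  have hlow : k * 2 ^ s ≤ n := by
    rw [← hk]
    exact Nat.div_mul_le_self n (2 ^ s)
  have hhigh : n < 2 ^ s * (k + 1) := by
    rw [← hk]
    exact Nat.lt_mul_div_succ n hs
  have e1 : 2 ^ (s + t - 1) = 2 ^ (t - 1) * 2 ^ s := by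
    rw [← Nat.pow_add]
    congr 1
    omega
  have e2 : 2 ^ (s + t - 1 + 1) = 2 ^ s * 2 ^ t := by
    rw [← Nat.pow_add]
    congr 1
    omega
  have b1 : 2 ^ (s + t - 1) ≤ n := by
    rw [e1]
    exact Nat.le_trans (Nat.mul_le_mul_right _ tlo) hlow
  have b2 : n < 2 ^ (s + t - 1 + 1) := by
    rw [e2]
    exact Nat.lt_of_lt_of_le hhigh (Nat.mul_le_mul_left _ thi)
  rw [bitLen_eq_of_bounds b1 b2]
  omega

/-- `ilog` of a negative number is 0. -/
theorem ilogVal_neg (n : Int) (h : n < 0) : ilogVal n = 0 := by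
  unfold ilogVal
  rw [if_pos h]

/-- **One range of `ilog`, with the case `n >> s = 0`** (the lowest numbers of a range: 16 … 31 for `s = 5`): for
`2 ^ (s − 1) ≤ n` and `n >> s ≤ 15` the bit length of `n` is `s + log2_4[n >> s]`. -/
theorem bitLen_range (n s : Nat) (hs : 1 ≤ s) (hlo : 2 ^ (s - 1) ≤ n) (hhi : n / 2 ^ s < 16) :
    bitLen n = s + log2_4Table.getD (n / 2 ^ s) 0 := by
  by_cases hk : n / 2 ^ s = 0
  · have hpos : 0 < 2 ^ s := Nat.pow_pos (by decide)
    have hlt : n < 2 ^ s * (n / 2 ^ s + 1) := Nat.lt_mul_div_succ n hpos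
    rw [hk, Nat.zero_add, Nat.mul_one] at hlt
    have e : s - 1 + 1 = s := by omega
    have hlt' : n < 2 ^ (s - 1 + 1) := by
      rw [e]
      exact hlt
    rw [hk, bitLen_eq_of_bounds hlo hlt', e]
    rfl
  · exact bitLen_shift n s _ rfl (Nat.pos_of_ne_zero hk) hhi

/-- **With the table's contents, `ilog(n)` is the bit length of `n`**, for every non-negative `int`. -/
theorem ilogVal_eq_bitLen (n : Int) (h0 : 0 ≤ n) (h31 : n < 2 ^ 31) : ilogVal n = bitLen n.toNat := by
  unfold ilogVal
  rw [if_neg (by omega)]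
  split
  · by_cases hz : n.toNat = 0
    · rw [hz]
      rfl
    · have := bitLen_shift n.toNat 0 n.toNat (by simp) (by omega) (by omega)
      omega
  split
  · exact (bitLen_range n.toNat 5 (by decide) (by simp only [Nat.reduceSub, Nat.reducePow]; omega) (by omega)).symm
  split
  · exact (bitLen_range n.toNat 10 (by decide) (by simp only [Nat.reduceSub, Nat.reducePow]; omega) (by omega)).symm
  split
  · exact (bitLen_range n.toNat 15 (by decide) (by simp only [Nat.reduceSub, Nat.reducePow]; omega) (by omega)).symm
  split
  · exact (bitLen_range n.toNat 20 (by decide) (by simp only [Nat.reduceSub, Nat.reducePow]; omega) (by omega)).symm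
  split
  · exact (bitLen_range n.toNat 25 (by decide) (by simp only [Nat.reduceSub, Nat.reducePow]; omega) (by omega)).symm
  · exact (bitLen_range n.toNat 30 (by decide) (by simp only [Nat.reduceSub, Nat.reducePow]; omega) (by omega)).symm

/-- What the callers of `ilog` use most: an argument below `2 ^ k` gives a result of at most `k` (`get_bits(ilog(x))`). -/
theorem ilogVal_le_of_lt (n : Int) (k : Nat) (h31 : n < 2 ^ 31) (h : n < 2 ^ k) : ilogVal n ≤ k := by
  by_cases h0 : 0 ≤ n
  · rw [ilogVal_eq_bitLen n h0 h31]
    apply bitLen_le_of_lt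
    have e : ((n.toNat : Nat) : Int) = n := Int.toNat_of_nonneg h0
    have : ((n.toNat : Nat) : Int) < ((2 ^ k : Nat) : Int) := by
      rw [e]
      exact_mod_cast h
    exact_mod_cast this
  · rw [ilogVal_neg n (by omega)]
    exact Nat.zero_le k

/-- `ilog(2 ^ k) = k + 1` (inverse_mdct, compute_bitreverse: `ld = ilog(n) − 1`). -/
theorem ilogVal_two_pow (k : Nat) (hk : k < 31) : ilogVal (2 ^ k) = k + 1 := by
  have hlt : (2 : Int) ^ k < 2 ^ 31 := by
    have : (2 : Nat) ^ k < 2 ^ 31 := Nat.pow_lt_pow_right (by decide) hk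
    exact_mod_cast this
  have hpos : (0 : Int) ≤ 2 ^ k := by
    have : 0 ≤ ((2 ^ k : Nat) : Int) := Int.natCast_nonneg _
    exact_mod_cast this
  rw [ilogVal_eq_bitLen _ hpos hlt]
  have e : ((2 : Int) ^ k).toNat = 2 ^ k := by
    have : ((2 : Int) ^ k) = ((2 ^ k : Nat) : Int) := (Int.natCast_pow 2 k).symm
    rw [this, Int.toNat_natCast]
  rw [e]
  exact bitLen_two_pow k

/-! #### The contract -/

/-- The signed value of the 32-bit part of a register, in the field vocabulary's `sint32` (Vorbis/Fields/Core.lean). -/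
theorem part32_toInt (x : Word) : (Word.part .w32 x).toInt = sint32 (x.toNat % 2 ^ 32) := by
  have e : Word.part .w32 x = BitVec.ofNat 32 (x.toNat % 2 ^ 32) := by
    apply BitVec.eq_of_toNat_eq
    unfold Word.part
    simp only [Width.bits, BitVec.toNat_setWidth, UInt64.toNat_toBitVec, BitVec.toNat_ofNat, Nat.mod_mod]
  rw [e]
  exact toInt_ofNat32 _ (Nat.mod_lt _ (by decide))

/-- **`ilog(edi = n)`** (CONTRACTS 25): `n` is the SIGNED value of edi (`(Word.part .w32 rdi).toInt`: the form of the walker's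
branch hypotheses; `part32_toInt` turns it into the field vocabulary's `sint32 (rdi % 2 ^ 32)`). The global `log2_4` is a live object (SH5): this alone
makes the seven `load1` checks pass (the index `n >> c` is in `[0, 15]` in every branch). A negative `n` returns 0 before any
push or memory access. IF the table has its contents at entry (`Log2_4In u.mem`, SH7), rax = `ilogVal n` = the bit length of
`n` (`ilogVal_eq_bitLen`). Stack: the pushed rbx, the return address of the check call, that routine's worst case: 32 bytes. -/
def ilog.spec (others : List Obj) (frames : List (Nat × FrameLayout)) : Spec where
  pre u :=
    ShadowPre others frames u ∧
    Vorbis.Globals.log2_4.obj ∈ others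
  post u v :=
    ShadowUntouched u.mem v.mem ∧
    ((Word.part .w32 (u.reg .rdi)).toInt < 0 → v.reg .rax = 0) ∧
    (Log2_4In u.mem → (v.reg .rax).toNat = ilogVal (Word.part .w32 (u.reg .rdi)).toInt)
  frame := 32
  writes _ := []

@[vspec] theorem ilog.spec_frame (others : List Obj) (frames : List (Nat × FrameLayout)) :
    (ilog.spec others frames).frame = 32 := id rfl

@[vspec] theorem ilog.spec_writes (others : List Obj) (frames : List (Nat × FrameLayout)) (u : State) :
    (ilog.spec others frames).writes u = [] := id rfl

/-! ### The comparison functions of the two `qsort` calls -/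

/-- The value a three-way unsigned comparison of this image leaves in rax: `mov eax, 0xffffffff` (−1 as an `int`, zero-extended)
if `x < y`, else `setb al ; movzx eax, al` of `y < x`: 1 or 0. -/
def cmpResult (x y : Nat) : Word :=
  if x < y then 0xFFFFFFFF
  else if y < x then 1
  else 0

/-- **`uint32_compare(rdi = p, rsi = q)`** (CONTRACTS 78; the comparison of `qsort(sorted_codewords, …, 4, uint32_compare)`):
the 4 bytes at `p` and the 4 bytes at `q` each lie inside one live object. Returns the sign of the unsigned comparison of the
two `uint32`s (as `cmpResult`); writes nothing but its own 48 bytes of stack (two pushes, `sub rsp, 8`, the return address of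
its check calls, that routine's worst case); no shadow byte is written. -/
def uint32_compare.spec (others : List Obj) (frames : List (Nat × FrameLayout)) : Spec where
  pre u :=
    ShadowPre others frames u ∧
    LiveIn others frames (u.reg .rdi).toNat 4 ∧
    LiveIn others frames (u.reg .rsi).toNat 4
  post u v :=
    ShadowUntouched u.mem v.mem ∧
    v.reg .rax = cmpResult (u.mem.readLE (u.reg .rdi) 4) (u.mem.readLE (u.reg .rsi) 4)
  frame := 48
  writes _ := []

@[vspec] theorem uint32_compare.spec_frame (others : List Obj) (frames : List (Nat × FrameLayout)) :
    (uint32_compare.spec others frames).frame = 48 := id rfl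

@[vspec] theorem uint32_compare.spec_writes (others : List Obj) (frames : List (Nat × FrameLayout)) (u : State) :
    (uint32_compare.spec others frames).writes u = [] := id rfl

/-- **`point_compare(rdi = a, rsi = b)`** (CONTRACTS 79; the comparison of `qsort(p, values, 4, point_compare)` in
start_decoder): `a` and `b` point to 4-byte records `stbv__floor_ordering` (`uint16 x` at offset 0, `uint16 id` at 2), each
inside one live object — the WHOLE record (4 = `Off.sizeof.stbv__floor_ordering`), although only `x` is read: this is what
qsort's `CmpSpec` with `w = 4` supplies, and the precondition is then literally that of `uint32_compare`. Returns the sign of the unsigned comparison of the two `x`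
(as `cmpResult`); writes nothing but its own 48 bytes of stack; no shadow byte is written. -/
def point_compare.spec (others : List Obj) (frames : List (Nat × FrameLayout)) : Spec where
  pre u :=
    ShadowPre others frames u ∧
    LiveIn others frames (u.reg .rdi).toNat 4 ∧
    LiveIn others frames (u.reg .rsi).toNat 4
  post u v :=
    ShadowUntouched u.mem v.mem ∧
    v.reg .rax = cmpResult (u.mem.readLE (u.reg .rdi) 2) (u.mem.readLE (u.reg .rsi) 2)
  frame := 48
  writes _ := []

@[vspec] theorem point_compare.spec_frame (others : List Obj) (frames : List (Nat × FrameLayout)) :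
    (point_compare.spec others frames).frame = 48 := id rfl

@[vspec] theorem point_compare.spec_writes (others : List Obj) (frames : List (Nat × FrameLayout)) (u : State) :
    (point_compare.spec others frames).writes u = [] := id rfl

/-! ### `include_in_sort` -/

/-- The value of `include_in_sort(c, len)` (stb_vorbis_fixed.c 1205-1211, the `assert` compiled out): 1 for a sparse
codebook; for a dense one, 1 exactly when the length byte is not `NO_CODE` (255) and exceeds `STB_VORBIS_FAST_HUFFMAN_LENGTH`
(10). `sparse` is the byte `c->sparse`, `len` the low byte of esi. -/
def includeInSort (sparse len : Nat) : Word :=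
  if sparse ≠ 0 then 1
  else if len ≠ 255 ∧ 10 < len then 1
  else 0

/-- **`include_in_sort(rdi = c, esi = len)`** (CONTRACTS 89): `*c` is a live object of `sizeof(Codebook)` bytes (the one
access is the `load1` of `c->sparse`, offset 27); only the low byte of esi is used. Returns `includeInSort c->sparse len` (what
compute_sorted_huffman counts by: CNT′); writes nothing but its own 48 bytes of stack (two pushes, `sub rsp, 8`, the return
address of its check call, that routine's worst case); no shadow byte is written. -/
def include_in_sort.spec (others : List Obj) (frames : List (Nat × FrameLayout)) : Spec where
  pre u :=
    ShadowPre others frames u ∧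
    LiveIn others frames (u.reg .rdi).toNat Off.sizeof.Codebook
  post u v :=
    ShadowUntouched u.mem v.mem ∧
    v.reg .rax = includeInSort (u.mem.readLE (u.reg .rdi + 27) 1) ((u.reg .rsi).toNat % 256)
  frame := 48
  writes _ := []

@[vspec] theorem include_in_sort.spec_frame (others : List Obj) (frames : List (Nat × FrameLayout)) :
    (include_in_sort.spec others frames).frame = 48 := id rfl

@[vspec] theorem include_in_sort.spec_writes (others : List Obj) (frames : List (Nat × FrameLayout)) (u : State) :
    (include_in_sort.spec others frames).writes u = [] := id rfl

end Vorbis.Spec
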